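-- pv_equiv track=rewrite | github.com/alteos98/FIB-CDI | CompresionSinPerdidas/03.1_Aritmetica_Entera_PRACTICA.py | calculateR
-- ===== SOURCE A (Python) =====
-- def calculateR(sum_frecuencias):
-- 	potencia = 1
-- 	trobat = False
-- 	r = sum_frecuencias * 4
-- 	while not trobat:
-- 		potencia *= 2
-- 		if potencia > r:
-- 			trobat = True
-- 			r = potencia
-- 	return r
-- ===== SOURCE B (Python) =====
-- def calculateR(sum_frecuencias):
--     r = sum_frecuencias * 4
--     return 1 << max(r, 1).bit_length()
-- ===== Notes on version B (the rewrite author's own statement) =====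
-- stated objective: idiomatic
-- what changed: Replaces the doubling while-loop with a closed-form bit_length shift.
import Mathlib
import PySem

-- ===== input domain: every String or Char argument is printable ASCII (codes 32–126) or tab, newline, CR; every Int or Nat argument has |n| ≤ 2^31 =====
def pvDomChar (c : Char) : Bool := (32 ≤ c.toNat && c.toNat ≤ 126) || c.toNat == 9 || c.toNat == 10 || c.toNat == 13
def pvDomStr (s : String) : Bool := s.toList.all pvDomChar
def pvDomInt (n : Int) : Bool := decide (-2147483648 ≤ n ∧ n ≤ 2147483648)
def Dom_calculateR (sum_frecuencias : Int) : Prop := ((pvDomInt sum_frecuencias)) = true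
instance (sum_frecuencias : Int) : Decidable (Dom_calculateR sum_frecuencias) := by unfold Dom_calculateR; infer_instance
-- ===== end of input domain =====

-- B replaces A's doubling while-loop by the closed form 1 << max(4*sum, 1).bit_length() (idiomatic, O(1)).

-- ===== PORT A =====
-- the 'while not trobat' loop: potencia *= 2; if potencia > r: return potencia
def calcLoopA (r potencia : Int) (hp : 0 < potencia) : Int :=
  if h : potencia * 2 > r then potencia * 2
  else calcLoopA r (potencia * 2) (by omega)
termination_by (r + 1 - potencia).toNat
decreasing_by omega

def calculateR (sum_frecuencias : Int) : Int :=
  calcLoopA (sum_frecuencias * 4) 1 (by norm_num)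

-- ===== PORT B =====
-- Python's n.bit_length() for n ≥ 0 is Nat.size; 1 << k is (1 : Int) <<< k
def calculateR_alt (sum_frecuencias : Int) : Int :=
  let r := sum_frecuencias * 4
  (1 : Int) <<< Nat.size (max r 1).toNat

-- ===== PRECONDITION & SPEC =====
def Spec_calculateR (sum_frecuencias : Int) (out : Int) : Prop := out = calculateR_alt sum_frecuencias
instance (sum_frecuencias : Int) (out : Int) : Decidable (Spec_calculateR sum_frecuencias out) := by unfold Spec_calculateR; infer_instance

-- ===== CLAIM (what is proved, stated in full; the proofs are below) =====
def Claim_equal_calculateR : Prop := ∀ (sum_frecuencias : Int), Dom_calculateR sum_frecuencias → Spec_calculateR sum_frecuencias (calculateR sum_frecuencias)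

-- ===== LEMMAS AND PROOFS =====
theorem calcLoopA_eq (r p : Int) (hp : 0 < p) :
    ∀ j : Nat, p = 2 ^ j → p ≤ max r 1 →
      calcLoopA r p hp = (1 : Int) <<< Nat.size (max r 1).toNat := by
  refine calcLoopA.induct r
      (fun p hp => ∀ j : Nat, p = 2 ^ j → p ≤ max r 1 →
        calcLoopA r p hp = (1 : Int) <<< Nat.size (max r 1).toNat) ?_ ?_ p hp
  · -- p * 2 > r : the loop returns p * 2 = 2 ^ (j+1)
    intro p hp h j hpj hle
    have hm : ((max r 1).toNat : Int) = max r 1 := Int.toNat_of_nonneg (by omega)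
    have hcast : ((2 ^ j : Nat) : Int) = (2 : Int) ^ j := by push_cast; ring
    have h1 : (2 : Nat) ^ j ≤ (max r 1).toNat := by
      have := hle; rw [hpj] at this; omega
    have h2 : (max r 1).toNat < 2 ^ (j + 1) := by
      have hgt : (2 : Int) ^ (j + 1) > max r 1 := by
        have h2p : (2:Int) ^ (j+1) = p * 2 := by rw [hpj]; ring
        omega
      have hcast2 : ((2 ^ (j+1) : Nat) : Int) = (2 : Int) ^ (j+1) := by push_cast; ring
      omega
    have hsize : Nat.size (max r 1).toNat = j + 1 :=
      le_antisymm (Nat.size_le.2 h2) (Nat.lt_size.2 h1)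
    rw [calcLoopA, dif_pos h, hsize, Int.shiftLeft_eq, hpj]; ring
  · -- p * 2 ≤ r : recurse with exponent j + 1
    intro p hp h ih j hpj hle
    rw [calcLoopA, dif_neg h]
    exact ih (j + 1) (by rw [hpj]; ring) (by omega)

-- ===== VERDICT (by name: the statement is the Claim_ definition above) =====
theorem calculateR_spec : Claim_equal_calculateR := by
  intro s _
  unfold Spec_calculateR calculateR calculateR_alt
  exact calcLoopA_eq (s * 4) 1 (by norm_num) 0 (by norm_num) (by omega)
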